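-- pv_equiv track=rewrite | github.com/iron-bun/adventofcode | 2023/day13.py | count_reflections
-- ===== SOURCE A (Python) =====
-- def count_reflections(mirror, desired_defects):
--   ans = 0
--   for candidate in range(1, len(mirror)):
--    offset = 0
--    defect_count = 0
--    while candidate - offset - 1>= 0 and candidate + offset < len(mirror):
--       for a, b in zip(mirror[candidate - offset - 1], mirror[candidate + offset]):
--         if a!=b:
--           defect_count += 1
--         if defect_count > desired_defects:
--           offset = len(mirror)
--           break
--       offset += 1
--    else:
--      if defect_count == desired_defects:
--        ans += 100*candidate
--
--   for candidate in range(1, len(mirror[0])):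
--    offset = 0
--    defect_count = 0
--    while candidate - offset - 1>= 0 and candidate + offset < len(mirror[0]):
--       for a, b in zip(tuple(v[candidate - offset - 1] for v in mirror), tuple(v[candidate + offset] for v in mirror)):
--         if a!=b:
--           defect_count += 1
--         if defect_count > desired_defects:
--           offset = len(mirror)
--           break
--       offset += 1
--    else:
--      if defect_count == desired_defects:
--        ans += candidate
--
--   return ans
-- ===== SOURCE B (Python) =====
-- def count_reflections(mirror, desired_defects):
--     # Return-value equivalence only. Different algorithm: instead of testing each
--     # candidate line by expanding mirrored pairs outward, bin the Hamming distance
--     # of every odd-separated pair of lines into a per-reflection-line table once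
--     # (pair (i, j), j = i+1+2t, contributes to reflection line c = i+1+t), then
--     # read the table; columns come from a single transpose.
--     ne = str.__ne__
--     def axis_score(lines):
--         n = len(lines)
--         diag = [0] * (n + 1)
--         for i in range(n):
--             u = lines[i]
--             for c, v in enumerate(lines[i + 1::2], i + 1):
--                 if u != v:
--                     diag[c] += sum(map(ne, u, v))
--         return sum(c for c in range(1, n) if diag[c] == desired_defects)
--     cols = [''.join(t) for t in zip(*mirror)]
--     return 100 * axis_score(list(mirror)) + axis_score(cols)
-- ===== Notes on version B (the rewrite author's own statement) =====
-- stated objective: alternative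
-- what changed: B replaces A's per-candidate outward expansion (while-loop over offsets with char-level early exit and a sentinel offset jump) by a different algorithm: one pass over all odd-separated pairs of lines bins each pair's Hamming distance into a per-reflection-line table (pair (i, i+1+2t) feeds line i+1+t), which is then read off once per candidate; columns come from a single transpose instead of per-offset column reconstruction, and identical lines are skipped by one string comparison.
-- outside the precondition, e.g. on count_reflections(['aaaaaaaa'], 0): A returns 28, B returns 28; on count_reflections(['abcdef'], 0): A does not finish within the time limit, B returns 0; on count_reflections(['ab', 'a'], 0): A raises IndexError, B returns 100
import Mathlib
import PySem

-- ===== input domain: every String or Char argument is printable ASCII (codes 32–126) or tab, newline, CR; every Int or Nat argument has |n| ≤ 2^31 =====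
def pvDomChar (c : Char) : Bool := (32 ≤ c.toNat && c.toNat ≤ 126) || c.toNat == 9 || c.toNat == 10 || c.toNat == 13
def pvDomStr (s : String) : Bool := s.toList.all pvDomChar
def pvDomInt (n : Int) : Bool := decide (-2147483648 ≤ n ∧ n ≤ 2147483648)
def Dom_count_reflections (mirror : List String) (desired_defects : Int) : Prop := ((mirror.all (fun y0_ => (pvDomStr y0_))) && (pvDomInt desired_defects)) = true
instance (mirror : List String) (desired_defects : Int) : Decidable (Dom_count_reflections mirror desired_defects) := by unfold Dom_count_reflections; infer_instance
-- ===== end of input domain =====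

-- B replaces A's per-candidate outward expansion (while-loop with offsets, char-level
-- early exit, sentinel jump) by a different algorithm: one pass over all odd-separated
-- line pairs bins each pair's Hamming distance into a per-reflection-line table, which
-- is then read off; columns come from a single transpose (objective: alternative).

-- ===== PORT A =====

/-- A's inner `for a, b in zip(...)` loop: count mismatches into `d`, flag a `break`
as soon as `d > desired`. Returns (defect_count, broke). -/
def pvForAB (desired : Int) : List (Char × Char) → Int → Int × Bool
  | [], d => (d, false)
  | (a, b) :: rest, d =>
      let d' := if a ≠ b then d + 1 else d
      if d' > desired then (d', true) else pvForAB desired rest d'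

/-- A's `while` loop for one candidate. `getL i` is the compared line (a row of `mirror`
in the first loop, a reconstructed column in the second), `bound` the loop bound
(`len(mirror)` resp. `len(mirror[0])`), `jump = len(mirror)` the sentinel the break
assigns to `offset`. `fuel` makes the recursion total: inside `Pre_` it is never
exhausted (the Python loop can run forever outside `Pre_`). -/
def pvWhileA (getL : Int → List Char) (bound jump desired c : Int) :
    Nat → Int → Int → Int
  | 0, _, d => d
  | fuel + 1, o, d =>
      if c - o - 1 ≥ 0 ∧ c + o < bound then
        let p := pvForAB desired ((getL (c - o - 1)).zip (getL (c + o))) d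
        let o' := if p.2 then jump else o
        pvWhileA getL bound jump desired c fuel (o' + 1) p.1
      else d

-- `mirror[i]` / `v[j]`: pyGet? with `.getD` default — out of range is Python's IndexError,
-- excluded by Pre_ (ragged or empty grids).
def count_reflections (mirror : List String) (desired_defects : Int) : Int :=
  let rows := mirror.map String.toList
  let n : Int := (mirror.length : Int)
  let w : Int := ((rows.headD []).length : Int)   -- len(mirror[0]); mirror = [] raises, excluded by Pre_
  let fuel : Nat := mirror.length + (rows.headD []).length + 2
  let ans := (PySem.List.pyRange 1 n 1).foldl (fun ans c =>
      let d := pvWhileA (fun i => ((PySem.List.pyGet? rows i).getD []))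
                 n n desired_defects c fuel 0 0
      if d = desired_defects then ans + 100 * c else ans) 0
  (PySem.List.pyRange 1 w 1).foldl (fun ans c =>
      let d := pvWhileA (fun j => rows.map (fun v => ((PySem.List.pyGet? v j).getD ' ')))
                 w n desired_defects c fuel 0 0
      if d = desired_defects then ans + c else ans) ans

-- ===== PORT B =====

/-- Source B: `sum(map(str.__ne__, u, v))` — mismatches over the shorter length (map truncates like zip). -/
def pvHamB (u v : List Char) : Int := ((u.zip v).countP (fun p => p.1 != p.2) : Nat)

/-- `xs[i+1::2]` (step-2 slice, not covered by PySem): every other element, ported by hand; exact. -/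
def pvEveryOther : List (List Char) → List (List Char)
  | [] => []
  | [x] => [x]
  | x :: _ :: rest => x :: pvEveryOther rest

/-- Source B's loop body: `if u != v: diag[c] += sum(map(ne, u, v))` with `p = (v, c)`.
(The enumerate index `c` is provably `< n + 1`, so plain `set`/`getD` are exact.) -/
def pvBinStep (u : List Char) (d : List Int) (p : List Char × Nat) : List Int :=
  if u ≠ p.1 then d.set p.2 (d.getD p.2 0 + pvHamB u p.1) else d

/-- Source B's `for c, v in enumerate(lines[i + 1::2], i + 1)` over the table `d`. -/
def pvBinRow (lines : List (List Char)) (d : List Int) (i : Nat) : List Int :=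
  ((pvEveryOther (lines.drop (i + 1))).zipIdx (i + 1)).foldl (pvBinStep (lines.getD i [])) d

/-- Source B's `axis_score`: build `diag`, then sum the candidates whose entry matches. -/
def pvAxisB (desired : Int) (lines : List (List Char)) : Int :=
  let n := lines.length
  let diag := (List.range n).foldl (pvBinRow lines) (List.replicate (n + 1) (0 : Int))
  (List.range' 1 (n - 1)).foldl
    (fun total c => if diag.getD c 0 = desired then total + (c : Int) else total) 0

/-- Source B: `[''.join(col) for col in zip(*mirror)]` (zip truncates to the shortest row). -/
def pvZipStar (rows : List (List Char)) : List (List Char) :=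
  match rows with
  | [] => []
  | r0 :: _ => (List.range (rows.foldl (fun m r => min m r.length) r0.length)).map
      (fun j => rows.map (fun r => r.getD j ' '))

def count_reflections_alt (mirror : List String) (desired_defects : Int) : Int :=
  let rows := mirror.map String.toList
  100 * pvAxisB desired_defects rows + pvAxisB desired_defects (pvZipStar rows)

-- ===== PRECONDITION & SPEC =====

-- Pre_ excludes: the empty grid and grids whose first row is longer than some later row
-- (A raises IndexError building columns), and grids wider than 2*height+3 (there A's
-- break-time `offset = len(mirror)` jump can re-enter the column while-loop and loop
-- forever; on the contents where A does return there, it returns B's value — see cites).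
def Pre_count_reflections (mirror : List String) (desired_defects : Int) : Prop :=
  mirror ≠ [] ∧
  ((mirror.headD "").toList.length ≤ 1 ∨
    ∀ s ∈ mirror, (mirror.headD "").toList.length ≤ s.toList.length) ∧
  (mirror.headD "").toList.length ≤ 2 * mirror.length + 3

instance (mirror : List String) (desired_defects : Int) :
    Decidable (Pre_count_reflections mirror desired_defects) := by
  unfold Pre_count_reflections; infer_instance

def pvWitness_count_reflections : List String × Int := (["#.##.", ".#..#", ".#..#"], 0)

def Spec_count_reflections (mirror : List String) (desired_defects : Int) (out : Int) : Prop := out = count_reflections_alt mirror desired_defects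
instance (mirror : List String) (desired_defects : Int) (out : Int) : Decidable (Spec_count_reflections mirror desired_defects out) := by unfold Spec_count_reflections; infer_instance

-- ===== CLAIM (what is proved, stated in full; the proofs are below) =====
def Claim_equal_count_reflections : Prop := ∀ (mirror : List String) (desired_defects : Int), Dom_count_reflections mirror desired_defects → Pre_count_reflections mirror desired_defects → Spec_count_reflections mirror desired_defects (count_reflections mirror desired_defects)

-- ===== LEMMAS AND PROOFS =====

/-- mismatch count of an already-zipped pair list (the quantity A's inner loop counts). -/
def pvCnt (zs : List (Char × Char)) : Int := (zs.countP (fun p => p.1 != p.2) : Nat)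

theorem pvCnt_nonneg (zs : List (Char × Char)) : 0 ≤ pvCnt zs := Int.natCast_nonneg _

theorem pvHamB_eq_cnt (a b : List Char) : pvHamB a b = pvCnt (a.zip b) := rfl

theorem pvCnt_cons (a b : Char) (rest : List (Char × Char)) :
    pvCnt ((a, b) :: rest) = pvCnt rest + (if a ≠ b then 1 else 0) := by
  simp only [pvCnt, List.countP_cons]
  rcases eq_or_ne a b with h | h <;> simp [h]

theorem pvForAB_le (desired : Int) (zs : List (Char × Char)) (d : Int)
    (h : d + pvCnt zs ≤ desired) : pvForAB desired zs d = (d + pvCnt zs, false) := by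
  induction zs generalizing d with
  | nil => simp [pvForAB, pvCnt]
  | cons z rest ih =>
      obtain ⟨a, b⟩ := z
      rw [pvCnt_cons] at h ⊢
      have hrest : 0 ≤ pvCnt rest := pvCnt_nonneg rest
      by_cases hab : a ≠ b
      · rw [if_pos hab] at h ⊢
        simp only [pvForAB, if_pos hab]
        rw [if_neg (by omega), ih (d + 1) (by omega)]
        simp only [Prod.mk.injEq]
        exact ⟨by ring, trivial⟩
      · rw [if_neg hab] at h ⊢
        simp only [pvForAB, if_neg hab]
        rw [if_neg (by omega), ih d (by omega)]
        simp

theorem pvForAB_fst_ge (desired : Int) (zs : List (Char × Char)) (d : Int) :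
    d ≤ (pvForAB desired zs d).1 := by
  induction zs generalizing d with
  | nil => simp [pvForAB]
  | cons z rest ih =>
      obtain ⟨a, b⟩ := z
      simp only [pvForAB]
      by_cases hab : a ≠ b
      · rw [if_pos hab]
        split_ifs with hgt
        · simp
        · have := ih (d + 1); omega
      · rw [if_neg hab]
        split_ifs with hgt
        · simp
        · exact ih d

theorem pvForAB_gt (desired : Int) (zs : List (Char × Char)) (d : Int)
    (h : desired < d + pvCnt zs) : desired < (pvForAB desired zs d).1 := by
  induction zs generalizing d with
  | nil => simpa [pvForAB, pvCnt] using h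
  | cons z rest ih =>
      obtain ⟨a, b⟩ := z
      rw [pvCnt_cons] at h
      simp only [pvForAB]
      by_cases hab : a ≠ b
      · rw [if_pos hab] at h
        rw [if_pos hab]
        split_ifs with hgt
        · simpa using hgt
        · exact ih (d + 1) (by omega)
      · rw [if_neg hab] at h
        rw [if_neg hab]
        split_ifs with hgt
        · simpa using hgt
        · exact ih d (by omega)

theorem pvWhileA_mono (getL : Int → List Char) (bound jump desired c : Int) :
    ∀ (fuel : Nat) (o d : Int), d ≤ pvWhileA getL bound jump desired c fuel o d := by
  intro fuel
  induction fuel with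
  | zero => intro o d; simp [pvWhileA]
  | succ f ih =>
      intro o d
      simp only [pvWhileA]
      by_cases hc : c - o - 1 ≥ 0 ∧ c + o < bound
      · rw [if_pos hc]
        exact le_trans (pvForAB_fst_ge desired _ d) (ih _ _)
      · rw [if_neg hc]

theorem pvSum_nonneg (Z : List (List Char × List Char)) :
    0 ≤ (Z.map (fun p => pvHamB p.1 p.2)).sum := by
  induction Z with
  | nil => simp
  | cons z rest ih =>
      simp only [List.map_cons, List.sum_cons]
      have := pvCnt_nonneg (z.1.zip z.2)
      rw [pvHamB_eq_cnt]; omega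

/-- Main loop invariant: with enough fuel and a guaranteed exit after a break-jump,
A's while-loop result equals `desired` iff the full mismatch sum does. -/
theorem pvWhileA_eq (getL : Int → List Char) (bound jump desired c : Int)
    (hexit : ¬ (c - (jump + 1) - 1 ≥ 0 ∧ c + (jump + 1) < bound)) :
    ∀ (Z : List (List Char × List Char)) (fuel : Nat) (o : Int) (d : Int),
      Z.length + 1 ≤ fuel → 0 ≤ o →
      (o + Z.length = min c (bound - c)) →
      (∀ (k : Nat) (hk : k < Z.length),
        Z[k] = (getL (c - 1 - (o + k)), getL (c + (o + k)))) →
      ((pvWhileA getL bound jump desired c fuel o d = desired) ↔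
        (d + (Z.map (fun p => pvHamB p.1 p.2)).sum = desired)) := by
  intro Z
  induction Z with
  | nil =>
      intro fuel o d hfuel ho hM _
      obtain ⟨f, rfl⟩ : ∃ f, fuel = f + 1 := ⟨fuel - 1, by omega⟩
      simp only [List.length_nil, Nat.cast_zero, add_zero] at hM
      have hcond : ¬ (c - o - 1 ≥ 0 ∧ c + o < bound) := by omega
      simp only [pvWhileA, if_neg hcond, List.map_nil, List.sum_nil, add_zero]
  | cons z rest ih =>
      intro fuel o d hfuel ho hM hZ
      obtain ⟨f, rfl⟩ : ∃ f, fuel = f + 1 := ⟨fuel - 1, by omega⟩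
      have hlen : ((z :: rest).length : Int) = (rest.length : Int) + 1 := by
        simp
      rw [hlen] at hM
      have hcond : c - o - 1 ≥ 0 ∧ c + o < bound := by omega
      simp only [pvWhileA, if_pos hcond]
      have hz : z = (getL (c - 1 - o), getL (c + o)) := by
        have := hZ 0 (by simp)
        simpa using this
      have harg1 : c - o - 1 = c - 1 - o := by ring
      have hpair : (getL (c - o - 1)).zip (getL (c + o)) = z.1.zip z.2 := by
        rw [harg1, hz]
      rw [hpair]
      have hSz : ((z :: rest).map (fun p => pvHamB p.1 p.2)).sum
          = pvCnt (z.1.zip z.2) + (rest.map (fun p => pvHamB p.1 p.2)).sum := by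
        simp [pvHamB_eq_cnt]
      by_cases hle : d + pvCnt (z.1.zip z.2) ≤ desired
      · rw [pvForAB_le desired _ d hle]
        simp only [if_neg (Bool.false_ne_true)]
        rw [ih f (o + 1) (d + pvCnt (z.1.zip z.2))
          (by simp at hfuel ⊢; omega) (by omega) (by omega)
          (by
            intro k hk
            have := hZ (k + 1) (by simp; omega)
            simp only [List.getElem_cons_succ] at this
            rw [this]
            congr 2 <;> push_cast <;> ring)]
        rw [hSz]
        constructor <;> intro h <;> omega
      · rw [not_le] at hle
        have hfst : desired < (pvForAB desired (z.1.zip z.2) d).1 :=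
          pvForAB_gt desired _ d hle
        have hrhs : ¬ (d + ((z :: rest).map (fun p => pvHamB p.1 p.2)).sum = desired) := by
          rw [hSz]
          have := pvSum_nonneg rest
          omega
      -- in both break/no-break branches the running count already exceeds `desired`
        rcases hb : (pvForAB desired (z.1.zip z.2) d).2 with _ | _
        · simp only [if_neg (Bool.false_ne_true)]
          have hm := pvWhileA_mono getL bound jump desired c f (o + 1)
            (pvForAB desired (z.1.zip z.2) d).1
          constructor <;> intro h
          · omega
          · exact absurd h hrhs
        · rw [if_pos rfl]
          obtain ⟨f', rfl⟩ : ∃ f', f = f' + 1 := ⟨f - 1, by simp at hfuel; omega⟩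
          simp only [pvWhileA, if_neg hexit]
          constructor <;> intro h
          · omega
          · exact absurd h hrhs

/-- folding two related step functions along the same list preserves `a = w * b + s`. -/
theorem pvFoldRel (l : List Nat) (fA fB : Int → Nat → Int) (w s : Int)
    (h : ∀ (a b : Int) (k : Nat), k ∈ l → a = w * b + s → fA a k = w * fB b k + s) :
    ∀ (a b : Int), a = w * b + s → l.foldl fA a = w * l.foldl fB b + s := by
  induction l with
  | nil => intro a b hab; simpa using hab
  | cons x xs ih =>
      intro a b hab
      simp only [List.foldl_cons]
      exact ih (fun a b k hk => h a b k (List.mem_cons_of_mem x hk))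
        (fA a x) (fB b x) (h a b x List.mem_cons_self hab)

/-- A runs its two candidate folds in sequence from the shared accumulator `ans`;
B scores the axes independently and combines `100 * rows + columns`. -/
theorem pvFoldPair2 (l1 l2 : List Nat) (fA1 fA2 fB1 fB2 : Int → Nat → Int)
    (h1 : ∀ (a b : Int) (k : Nat), k ∈ l1 → a = 100 * b → fA1 a k = 100 * fB1 b k)
    (h2 : ∀ (a b s : Int) (k : Nat), k ∈ l2 → a = b + s → fA2 a k = fB2 b k + s) :
    l2.foldl fA2 (l1.foldl fA1 0) = 100 * l1.foldl fB1 0 + l2.foldl fB2 0 := by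
  have e1 : l1.foldl fA1 0 = 100 * l1.foldl fB1 0 + 0 :=
    pvFoldRel l1 fA1 fB1 100 0
      (fun a b k hk hab => by
        have := h1 a b k hk (by omega); omega) 0 0 (by ring)
  have e2 : l2.foldl fA2 (l1.foldl fA1 0) = 1 * l2.foldl fB2 0 + (100 * l1.foldl fB1 0 + 0) :=
    pvFoldRel l2 fA2 fB2 1 (100 * l1.foldl fB1 0 + 0)
      (fun a b k hk hab => by
        have := h2 a b (100 * l1.foldl fB1 0 + 0) k hk (by omega); omega)
      (l1.foldl fA1 0) 0 (by omega)
  rw [e2]; ring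

theorem pvFoldlMin_le (rows : List (List Char)) (a : Nat) :
    rows.foldl (fun m r => min m r.length) a ≤ a := by
  induction rows generalizing a with
  | nil => simp
  | cons r rest ih => exact le_trans (ih (min a r.length)) (by omega)

theorem pvFoldlMin_eq (rows : List (List Char)) (a : Nat)
    (h : ∀ r ∈ rows, a ≤ r.length) :
    rows.foldl (fun m r => min m r.length) a = a := by
  induction rows generalizing a with
  | nil => simp
  | cons r rest ih =>
      simp only [List.foldl_cons]
      rw [min_eq_left (h r List.mem_cons_self)]
      exact ih a (fun r' hr' => h r' (List.mem_cons_of_mem r hr'))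

-- The zipped mirrored slices at candidate c of `lines` (B's diag value, A's gathered pairs).
theorem pvZ_length (lines : List (List Char)) (c : Nat) (hc2 : c < lines.length) :
    ((lines.take c).reverse.zip (lines.drop c)).length = min c (lines.length - c) := by
  simp [List.length_zip]

theorem pvZ_get (lines : List (List Char)) (c : Nat) (hc2 : c < lines.length)
    (k : Nat) (hk : k < ((lines.take c).reverse.zip (lines.drop c)).length) :
    ((lines.take c).reverse.zip (lines.drop c))[k]
      = (lines[c - 1 - k]'(by simp [List.length_zip] at hk; omega),
         lines[c + k]'(by simp [List.length_zip] at hk; omega)) := by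
  have hk' := hk
  simp only [List.length_zip, List.length_reverse, List.length_take, List.length_drop] at hk'
  rw [List.getElem_zip]
  congr 1
  · rw [List.getElem_reverse, List.getElem_take]
    · congr 1
      simp
      omega
  · rw [List.getElem_drop]

/-- the mirrored-slice mismatch sum B's table must reproduce at candidate `c`. -/
def pvMirSum (lines : List (List Char)) (c : Nat) : Int :=
  (((lines.take c).reverse.zip (lines.drop c)).map (fun p => pvHamB p.1 p.2)).sum

/-- per-candidate: A's while-loop test agrees with the mirrored-slice mismatch sum. -/
theorem pvCand (getL : Int → List Char) (lines : List (List Char))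
    (desired bound jump : Int) (fuel : Nat) (c : Nat) (ci : Int) (hci : ci = (c : Int))
    (hc1 : 1 ≤ c) (hc2 : c < lines.length)
    (hbound : bound = (lines.length : Int))
    (hfuel : lines.length + 1 ≤ fuel)
    (hexit : ¬ (ci - (jump + 1) - 1 ≥ 0 ∧ ci + (jump + 1) < bound))
    (hget : ∀ (k : Nat) (hk : k < lines.length), getL (k : Int) = lines[k]) :
    ((pvWhileA getL bound jump desired ci fuel 0 0 = desired) ↔
      (pvMirSum lines c = desired)) := by
  subst hci
  have hlen := pvZ_length lines c hc2
  unfold pvMirSum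
  rw [pvWhileA_eq getL bound jump desired (c : Int) hexit
      ((lines.take c).reverse.zip (lines.drop c)) fuel 0 0
      (by omega) (le_refl 0)
      (by rw [hlen, hbound]; push_cast; omega)
      (by
        intro k hk
        rw [pvZ_get lines c hc2 k hk]
        have hkb : k < min c (lines.length - c) := by rw [← hlen]; exact hk
        have e1 : ((c : Int) - 1 - (0 + (k : Int))) = ((c - 1 - k : Nat) : Int) := by
          omega
        have e2 : ((c : Int) + (0 + (k : Int))) = ((c + k : Nat) : Int) := by
          push_cast; omega
        rw [e1, e2, hget (c - 1 - k) (by omega), hget (c + k) (by omega)])]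
  constructor <;> intro h <;> omega

-- ===== B-side: the binned table equals the mirrored-slice sums =====

theorem pvBinStep_length (u : List Char) (d : List Int) (p : List Char × Nat) :
    (pvBinStep u d p).length = d.length := by
  unfold pvBinStep
  split_ifs <;> simp

theorem pvFoldBinStep_length (u : List Char) :
    ∀ (ps : List (List Char × Nat)) (d : List Int),
      (ps.foldl (pvBinStep u) d).length = d.length := by
  intro ps
  induction ps with
  | nil => intro d; rfl
  | cons p rest ih =>
      intro d
      simp only [List.foldl_cons]
      rw [ih, pvBinStep_length]

theorem pvHamB_self (u : List Char) : pvHamB u u = 0 := by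
  unfold pvHamB
  induction u with
  | nil => rfl
  | cons x xs ih =>
      rw [List.zip_cons_cons, List.countP_cons]
      simpa using ih

theorem pvBinStep_getD (u : List Char) (d : List Int) (p : List Char × Nat) (c : Nat)
    (hc : c < d.length) :
    (pvBinStep u d p).getD c 0
      = d.getD c 0 + (if p.2 = c then pvHamB u p.1 else 0) := by
  unfold pvBinStep
  by_cases hne : u ≠ p.1
  · rw [if_pos hne]
    by_cases htc : p.2 = c
    · rw [if_pos htc, htc]
      rw [List.getD_eq_getElem?_getD, List.getD_eq_getElem?_getD,
        List.getElem?_set_self (by omega)]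
      simp [List.getD_eq_getElem?_getD]
    · rw [if_neg htc]
      simp only [List.getD_eq_getElem?_getD, List.getElem?_set_ne htc]
      ring
  · rw [if_neg hne]
    rw [not_not] at hne
    by_cases htc : p.2 = c
    · rw [if_pos htc, ← hne, pvHamB_self]
      ring
    · rw [if_neg htc]
      ring

theorem pvFoldBinStep_getD (u : List Char) (c : Nat) :
    ∀ (ps : List (List Char × Nat)) (d : List Int), c < d.length →
      (ps.foldl (pvBinStep u) d).getD c 0
        = d.getD c 0 + (ps.map (fun p => if p.2 = c then pvHamB u p.1 else 0)).sum := by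
  intro ps
  induction ps with
  | nil => intro d _; simp
  | cons p rest ih =>
      intro d hc
      simp only [List.foldl_cons, List.map_cons, List.sum_cons]
      rw [ih _ (by rw [pvBinStep_length]; exact hc), pvBinStep_getD u d p c hc]
      ring

/-- the step-2 slice, element by element. -/
theorem pvEveryOther_eq : ∀ (xs : List (List Char)),
    pvEveryOther xs = (List.range ((xs.length + 1) / 2)).map (fun t => xs.getD (2 * t) [])
  | [] => by simp [pvEveryOther]
  | [x] => by simp [pvEveryOther, List.range_succ]
  | x :: y :: rest => by
      rw [pvEveryOther, pvEveryOther_eq rest]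
      simp only [List.length_cons]
      rw [show (rest.length + 1 + 1 + 1) / 2 = (rest.length + 1) / 2 + 1 by omega,
        List.range_succ_eq_map, List.map_cons, List.map_map]
      refine congrArg₂ _ rfl ?_
      refine List.map_congr_left ?_
      intro t _
      simp only [Function.comp_apply]
      rw [show 2 * (t + 1) = 2 * t + 1 + 1 by ring]
      simp [List.getD_cons_succ]

/-- `enumerate` over a range-shaped list. -/
theorem pvZipIdxRange {α : Type} : ∀ (m k : Nat) (g : Nat → α),
    ((List.range m).map g).zipIdx k = (List.range m).map (fun t => (g t, k + t)) := by
  intro m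
  induction m with
  | zero => intro k g; rfl
  | succ q ih =>
      intro k g
      rw [List.range_succ_eq_map]
      simp only [List.map_cons, List.map_map, List.zipIdx]
      rw [ih (k + 1) (g ∘ Nat.succ)]
      refine congrArg₂ _ (by simp) ?_
      refine List.map_congr_left ?_
      intro t _
      simp only [Function.comp_apply]
      refine congrArg₂ _ rfl (by omega)

/-- at most one enumerate index hits `c`; the run's sum is its term. -/
theorem pvPointSum (k c : Nat) (f : Nat → Int) :
    ∀ (m : Nat),
      ((List.range m).map (fun t => if k + t = c then f t else 0)).sum
        = if k ≤ c ∧ c < k + m then f (c - k) else 0 := by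
  intro m
  induction m with
  | zero =>
      rw [if_neg (by omega)]
      simp
  | succ q ih =>
      rw [List.range_succ]
      simp only [List.map_append, List.sum_append, List.map_cons, List.map_nil,
        List.sum_cons, List.sum_nil]
      rw [ih]
      by_cases hh : k + q = c
      · rw [if_neg (by omega), if_pos (by omega), if_pos (by omega),
          show c - k = q by omega]
        ring
      · rw [if_neg hh]
        split_ifs with h1 h2 h2 <;> first | omega | ring

theorem pvFoldBinRow_getD (lines : List (List Char)) (c : Nat) :
    ∀ (is : List Nat) (d : List Int), c < d.length →
      (is.foldl (pvBinRow lines) d).getD c 0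
        = d.getD c 0 + (is.map (fun i =>
            if i + 1 ≤ c ∧ c < i + 1 + (lines.length - (i + 1) + 1) / 2
              then pvHamB (lines.getD i []) (lines.getD (i + 1 + 2 * (c - (i + 1))) [])
              else 0)).sum := by
  intro is
  induction is with
  | nil => intro d _; simp
  | cons i rest ih =>
      intro d hc
      simp only [List.foldl_cons, List.map_cons, List.sum_cons]
      rw [ih _ (by unfold pvBinRow; rw [pvFoldBinStep_length]; exact hc)]
      unfold pvBinRow
      rw [pvFoldBinStep_getD (lines.getD i []) c _ d hc, pvEveryOther_eq,
        pvZipIdxRange]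
      rw [List.map_map]
      have hdl : (lines.drop (i + 1)).length = lines.length - (i + 1) := by simp
      rw [hdl]
      have hmap : (List.range ((lines.length - (i + 1) + 1) / 2)).map
            ((fun p => if p.2 = c then pvHamB (lines.getD i []) p.1 else 0) ∘
              (fun t => ((lines.drop (i + 1)).getD (2 * t) [], i + 1 + t)))
          = (List.range ((lines.length - (i + 1) + 1) / 2)).map
            (fun t => if i + 1 + t = c
              then pvHamB (lines.getD i []) (lines.getD (i + 1 + 2 * t) []) else 0) := by
        refine List.map_congr_left ?_
        intro t _
        simp only [Function.comp_apply]
        have hget : (lines.drop (i + 1)).getD (2 * t) [] = lines.getD (i + 1 + 2 * t) [] := by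
          simp [List.getD_eq_getElem?_getD, List.getElem?_drop]
        rw [hget]
      rw [hmap, pvPointSum (i + 1) c _ ((lines.length - (i + 1) + 1) / 2),
        show c - (i + 1) = c - (i + 1) by rfl]
      ring

/-- sum of an indicator window over `range n` collapses to the window itself. -/
theorem pvSumWindow (f : Nat → Int) (lo c : Nat) :
    ∀ n, ((List.range n).map (fun i => if lo ≤ i ∧ i < c then f i else 0)).sum
      = ((List.range' lo (min c n - lo)).map f).sum := by
  intro n
  induction n with
  | zero =>
      have : min c 0 - lo = 0 := by omega
      simp [this]
  | succ m ih =>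
      rw [List.range_succ]
      simp only [List.map_append, List.sum_append, List.map_cons, List.map_nil,
        List.sum_cons, List.sum_nil]
      rw [ih]
      by_cases h1 : m < c
      · by_cases h2 : lo ≤ m
        · rw [if_pos ⟨h2, h1⟩]
          have e1 : min c (m + 1) - lo = (min c m - lo) + 1 := by omega
          rw [e1, List.range'_concat, show lo + 1 * (min c m - lo) = m by omega]
          simp [List.sum_append]
          try ring
        · rw [if_neg (by omega)]
          have : min c (m + 1) - lo = min c m - lo := by omega
          rw [this]
          ring
      · rw [if_neg (by omega)]
        have : min c (m + 1) - lo = min c m - lo := by omega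
        rw [this]
        ring

/-- reading the window backwards: `range' (c - m) m` summed via `k ↦ c - 1 - k`. -/
theorem pvSumRev (f : Nat → Int) (c : Nat) :
    ∀ m, m ≤ c →
      ((List.range' (c - m) m).map f).sum
        = ((List.range m).map (fun k => f (c - 1 - k))).sum := by
  intro m
  induction m with
  | zero => intro _; simp
  | succ p ih =>
      intro hm
      have e1 : List.range' (c - (p + 1)) (p + 1) = (c - p - 1) :: List.range' (c - p) p := by
        rw [List.range'_succ, show c - (p + 1) + 1 = c - p by omega,
          show c - (p + 1) = c - p - 1 by omega]
      rw [e1, List.range_succ]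
      simp only [List.map_cons, List.sum_cons, List.map_append, List.sum_append,
        List.map_nil, List.sum_nil]
      rw [ih (by omega)]
      have : c - 1 - p = c - p - 1 := by omega
      rw [this]
      ring

/-- B's finished table holds exactly the mirrored-slice mismatch sums. -/
theorem pvDiag_eq (lines : List (List Char)) (c : Nat) (hc1 : 1 ≤ c)
    (hc2 : c < lines.length) :
    ((List.range lines.length).foldl (pvBinRow lines)
        (List.replicate (lines.length + 1) (0 : Int))).getD c 0
      = pvMirSum lines c := by
  set n := lines.length with hn
  have hlen : c < (List.replicate (n + 1) (0 : Int)).length := by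
    simp; omega
  rw [pvFoldBinRow_getD lines c (List.range n) _ hlen]
  have h0 : (List.replicate (n + 1) (0 : Int)).getD c 0 = 0 := by
    simp [List.getD_eq_getElem?_getD, show c ≤ n by omega]
  rw [h0, zero_add]
  -- rewrite the per-i guard into a window indicator
  have hcong : (List.range n).map (fun i =>
        if i + 1 ≤ c ∧ c < i + 1 + (lines.length - (i + 1) + 1) / 2
          then pvHamB (lines.getD i []) (lines.getD (i + 1 + 2 * (c - (i + 1))) []) else 0)
      = (List.range n).map (fun i =>
        if 2 * c - n ≤ i ∧ i < c
          then pvHamB (lines.getD i []) (lines.getD (2 * c - i - 1) []) else 0) := by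
    refine List.map_congr_left ?_
    intro i hi
    have hi2 : i < n := List.mem_range.mp hi
    by_cases h : 2 * c - n ≤ i ∧ i < c
    · rw [if_pos h, if_pos (by rw [← hn]; omega),
        show i + 1 + 2 * (c - (i + 1)) = 2 * c - i - 1 by omega]
    · rw [if_neg h, if_neg (by rw [← hn]; omega)]
  rw [hcong, pvSumWindow _ (2 * c - n) c n]
  have hm : min c n - (2 * c - n) = min c (n - c) := by omega
  have hlo : 2 * c - n = c - min c (n - c) := by omega
  rw [hm, hlo, pvSumRev _ c (min c (n - c)) (by omega)]
  -- finally identify term by term with the zipped mirrored slices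
  have hzl := pvZ_length lines c (hn ▸ hc2)
  have hlist : (List.range (min c (n - c))).map
      (fun k => pvHamB (lines.getD (c - 1 - k) []) (lines.getD (2 * c - (c - 1 - k) - 1) []))
      = ((lines.take c).reverse.zip (lines.drop c)).map (fun p => pvHamB p.1 p.2) := by
    apply List.ext_getElem
    · simp [hzl, hn]
    · intro k h1 h2
      have hk : k < min c (n - c) := by simpa using h1
      simp only [List.getElem_map, List.getElem_range]
      rw [pvZ_get lines c (hn ▸ hc2) k (by rw [hzl]; exact hk)]
      have e2 : 2 * c - (c - 1 - k) - 1 = c + k := by omega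
      rw [e2]
      congr 1
      · rw [List.getD_eq_getElem?_getD, List.getElem?_eq_getElem (by omega : c - 1 - k < lines.length)]
        rfl
      · rw [List.getD_eq_getElem?_getD, List.getElem?_eq_getElem (by omega : c + k < lines.length)]
        rfl
  unfold pvMirSum
  exact congrArg List.sum hlist

theorem pvFoldCongr {a b : Type} (l : List a) (f g : b -> a -> b)
    (h : ∀ (x : b) (y : a), y ∈ l -> f x y = g x y) :
    ∀ (x : b), l.foldl f x = l.foldl g x := by
  induction l with
  | nil => intro x; rfl
  | cons y ys ih =>
      intro x
      simp only [List.foldl_cons]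
      rw [h x y List.mem_cons_self]
      exact ih (fun x' y' hy' => h x' y' (List.mem_cons_of_mem y hy')) (g x y)

/-- B's `axis_score` equals the per-candidate gather of mirrored-slice sums. -/
theorem pvAxisB_gather (desired : Int) (lines : List (List Char)) :
    pvAxisB desired lines
      = (List.range' 1 (lines.length - 1)).foldl
          (fun total c => if pvMirSum lines c = desired then total + (c : Int) else total) 0 := by
  simp only [pvAxisB]
  refine pvFoldCongr _ _ _ ?_ 0
  intro t c hc
  rw [List.mem_range'_1] at hc
  rw [pvDiag_eq lines c (by omega) (by omega)]

-- ===== VERDICT (by name: the statement is the Claim_ definition above) =====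
theorem count_reflections_spec : Claim_equal_count_reflections := by
  intro mirror desired _ hpre
  obtain ⟨hne, hrag, hwide⟩ := hpre
  unfold Spec_count_reflections
  cases mirror with
  | nil => exact absurd rfl hne
  | cons m0 mt =>
    simp only [List.headD_cons, List.length_cons] at hrag hwide
    simp only [count_reflections, count_reflections_alt, pvAxisB_gather,
      List.map_cons, List.headD_cons, List.length_cons]
    -- put the candidate lists into `List.range` form
    rw [PySem.List.pyRange_one 1 (((mt.length + 1 : Nat)) : Int)]
    rw [show (((((mt.length + 1 : Nat)) : Int) - 1).toNat) = mt.length by omega]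
    simp only [List.length_map, Nat.add_sub_cancel, List.range'_eq_map_range, List.foldl_map]
    rcases hrag with hsm | hall
    · -- first row of width ≤ 1: no column candidates on either side
      rw [PySem.List.pyRange_one_eq_nil
        (show ((String.toList m0).length : Int) ≤ 1 by exact_mod_cast hsm)]
      simp only [List.foldl_nil]
      have h0 : (pvZipStar (String.toList m0 :: List.map String.toList mt)).length - 1 = 0 := by
        have h1 : (pvZipStar (String.toList m0 :: List.map String.toList mt)).length ≤ (String.toList m0).length := by
          simp only [pvZipStar, List.length_map, List.length_range]
          exact pvFoldlMin_le _ _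
        omega
      rw [h0]
      simp only [List.range_zero, List.foldl_nil]
      refine pvFoldRel (List.range mt.length) _ _ 100 0 ?_ 0 0 (by ring)
      intro a b k hk hab
      have hk2 : k < mt.length := List.mem_range.mp hk
      have hiff := pvCand (fun i => (PySem.List.pyGet? (String.toList m0 :: List.map String.toList mt) i).getD [])
        (String.toList m0 :: List.map String.toList mt) desired (((mt.length + 1 : Nat)) : Int) (((mt.length + 1 : Nat)) : Int)
        (mt.length + 1 + (String.toList m0).length + 2) (1 + k) (1 + (k : Int))
        (by push_cast; ring) (by omega) (by simp; omega) (by simp) (by simp; omega)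
        (by push_cast; omega)
        (fun j hj => by
          simp only [PySem.List.pyGet?_ofNat _ j hj, Option.getD_some])
      simp only [hiff]
      split_ifs with hcnd
      · push_cast
        omega
      · omega
    · -- rectangular-enough grid: both column scores agree candidate by candidate
      have hall2 : ∀ r ∈ (String.toList m0 :: List.map String.toList mt), (String.toList m0).length ≤ r.length := by
        intro r hr
        rcases List.mem_cons.mp hr with rfl | hr
        · exact le_refl _
        · obtain ⟨sx, hs, rfl⟩ := List.mem_map.mp hr
          exact hall sx (List.mem_cons_of_mem m0 hs)
      have hmin : (pvZipStar (String.toList m0 :: List.map String.toList mt)).length = (String.toList m0).length := by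
        simp only [pvZipStar, List.length_map, List.length_range]
        exact pvFoldlMin_eq _ _ hall2
      rw [hmin]
      rw [PySem.List.pyRange_one 1 (((String.toList m0).length : Nat) : Int)]
      rw [show ((((String.toList m0).length : Int) - 1).toNat) = (String.toList m0).length - 1 by omega]
      simp only [List.foldl_map]
      refine pvFoldPair2 (List.range mt.length) (List.range ((String.toList m0).length - 1))
        _ _ _ _ ?_ ?_
      · -- row candidates
        intro a b k hk hab
        have hk2 : k < mt.length := List.mem_range.mp hk
        have hiff := pvCand (fun i => (PySem.List.pyGet? (String.toList m0 :: List.map String.toList mt) i).getD [])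
          (String.toList m0 :: List.map String.toList mt) desired (((mt.length + 1 : Nat)) : Int) (((mt.length + 1 : Nat)) : Int)
          (mt.length + 1 + (String.toList m0).length + 2) (1 + k) (1 + (k : Int))
          (by push_cast; ring) (by omega) (by simp; omega) (by simp) (by simp; omega)
          (by push_cast; omega)
          (fun j hj => by
            simp only [PySem.List.pyGet?_ofNat _ j hj, Option.getD_some])
        simp only [hiff]
        split_ifs with hcnd
        · push_cast
          omega
        · omega
      · -- column candidates
        intro a b s k hk habs
        have hk2 : k < (String.toList m0).length - 1 := List.mem_range.mp hk
        have hzs : pvZipStar (String.toList m0 :: List.map String.toList mt)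
            = (List.range ((String.toList m0).length)).map
                (fun j => List.map (fun r => r.getD j ' ') (String.toList m0 :: List.map String.toList mt)) := by
          simp only [pvZipStar]
          rw [pvFoldlMin_eq _ _ hall2]
        have hiff := pvCand
          (fun j => (PySem.List.pyGet? (String.toList m0) j).getD ' ' ::
            List.map (fun v => (PySem.List.pyGet? v j).getD ' ') (List.map String.toList mt))
          (pvZipStar (String.toList m0 :: List.map String.toList mt)) desired (((String.toList m0).length : Nat) : Int)
          (((mt.length + 1 : Nat)) : Int)
          (mt.length + 1 + (String.toList m0).length + 2) (1 + k) (1 + (k : Int))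
          (by push_cast; ring) (by omega) (by rw [hmin]; omega)
          (by rw [hmin]) (by rw [hmin]; omega)
          (by push_cast; omega)
          (fun j hj => by
            have hj2 : j < (String.toList m0).length := hmin ▸ hj
            have hval : (pvZipStar (String.toList m0 :: List.map String.toList mt))[j]'hj
                = List.map (fun r => r.getD j ' ') (String.toList m0 :: List.map String.toList mt) := by
              apply Option.some.inj
              rw [← List.getElem?_eq_getElem hj, hzs, List.getElem?_map,
                List.getElem?_range hj2, Option.map_some]
            rw [hval, List.map_cons]
            beta_reduce
            congr 1
            · rw [PySem.List.pyGet?_ofNat (String.toList m0) j hj2]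
              simp [List.getD_eq_getElem?_getD, List.getElem?_eq_getElem hj2]
            · refine List.map_congr_left ?_
              intro r hr
              have hlenr : (String.toList m0).length ≤ r.length :=
                hall2 r (List.mem_cons_of_mem _ hr)
              rw [PySem.List.pyGet?_ofNat r j (by omega), List.getD_eq_getElem?_getD,
                List.getElem?_eq_getElem (show j < r.length by omega)])
        simp only [hiff]
        split_ifs with hcnd
        · push_cast
          omega
        · omega
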